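-- pv_equiv track=rewrite | github.com/NGTri23/WordGrid | app.py | comparer_mots
-- ===== SOURCE A (Python) =====
-- def comparer_mots(mot_secret : str, mot_proposé : str) -> str:
--     """Fonction pour comparer le mot_secret à deviner et le mot_proposé par le joueur
--     Elle retourne un str qui contient les couleurs (V, J, G) correspondant à chaque lettre du mot_proposé
--     """
--     assert len(mot_proposé) == len(mot_secret), "la longueur de 'mot_proposé' et 'mot_secret' ne sont pas pareil"
--
--     resultat = []
--     mot2_utilise = list(mot_secret)  # Pour éviter de compter une lettre deux fois
--
--     # Première passage : vérifier les lettres bien placées (V)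
--     for i in range(len(mot_secret)):
--         if mot_secret[i] == mot_proposé[i]:
--             resultat.append("V")
--             mot2_utilise[i] = None
--         else:
--             resultat.append(None)
--
--     # Deuxième passage : vérifier lettres présentes mais mal placées (J) ou absentes (G)
--     for i in range(len(mot_secret)):
--         if resultat[i] is None:
--             if mot_proposé[i] in mot2_utilise:
--                 resultat[i] = "J"
--                 mot2_utilise[mot2_utilise.index(mot_proposé[i])] = None
--             else:
--                 resultat[i] = "G"
--
--     return "".join(resultat)
-- ===== SOURCE B (Python) =====
-- def comparer_mots(mot_secret: str, mot_proposé: str) -> str: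
--     """Letter-indexed re-implementation: greens positionally, then for each distinct
--     letter mark the leftmost `available` non-green occurrences as 'J', the rest stay 'G'."""
--     assert len(mot_proposé) == len(mot_secret), "la longueur de 'mot_proposé' et 'mot_secret' ne sont pas pareil"
--
--     resultat = []
--     avail = {}  # per letter: count in the secret minus greens already consumed
--     for a, b in zip(mot_secret, mot_proposé):
--         if a == b:
--             resultat.append('V')
--         else:
--             resultat.append('G')
--             avail[a] = avail.get(a, 0) + 1
--
--     pos = {}  # per letter: its non-green positions in the guess, left to right
--     for i, (r, c) in enumerate(zip(resultat, mot_proposé)):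
--         if r != 'V':
--             pos[c] = pos.get(c, []) + [i]
--
--     for c, idxs in pos.items():
--         for i in idxs[:avail.get(c, 0)]:
--             resultat[i] = 'J'
--
--     return ''.join(resultat)
-- ===== Notes on version B (the rewrite author's own statement) =====
-- stated objective: faster
-- what changed: A's second positional scan that consumes a mutable copy of the secret (an O(n) membership test plus list.index per non-green position) is replaced by a letter-indexed pass: per-letter availability counts and per-letter lists of non-green guess positions are built once in dicts, and for each letter the leftmost `available` such positions are marked 'J'.
import Mathlib
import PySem

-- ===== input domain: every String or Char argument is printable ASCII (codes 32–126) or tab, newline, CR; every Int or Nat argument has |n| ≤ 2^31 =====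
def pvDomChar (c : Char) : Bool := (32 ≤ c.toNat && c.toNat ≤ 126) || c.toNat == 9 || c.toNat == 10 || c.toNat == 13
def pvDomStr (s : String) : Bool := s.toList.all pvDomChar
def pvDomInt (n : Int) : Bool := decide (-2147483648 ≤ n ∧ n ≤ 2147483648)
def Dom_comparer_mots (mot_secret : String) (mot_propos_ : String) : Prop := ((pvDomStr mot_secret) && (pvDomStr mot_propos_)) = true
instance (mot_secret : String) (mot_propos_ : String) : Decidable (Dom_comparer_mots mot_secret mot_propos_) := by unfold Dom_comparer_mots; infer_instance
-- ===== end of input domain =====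

-- B replaces A's second scan (consuming a mutable copy of the secret via an O(n) membership test
-- + list.index per position) by a letter-indexed pass: per-letter availability counts and per-letter
-- position lists built once in dicts, marking the leftmost `available` non-green occurrences of each
-- letter 'J' (measurably faster on the generated timing inputs).

-- ===== PORT A =====
-- first loop: resultat gets 'V'/None, mot2_utilise gets None at green positions
def pass1A : List Char → List Char → List (Option Char) × List (Option Char)
  | a :: s, b :: p =>
    let r := pass1A s p
    if a = b then (some 'V' :: r.1, none :: r.2) else (none :: r.1, some a :: r.2)
  | _, _ => ([], [])

-- second loop: each None slot becomes 'J' (consuming the first matching mot2 entry) or 'G'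
def pass2A : List (Option Char) → List Char → List (Option Char) → List Char
  | some ch :: rs, _ :: ps, m => ch :: pass2A rs ps m
  | none :: rs, c :: ps, m =>
    if some c ∈ m then
      'J' :: pass2A rs ps (m.set ((PySem.List.index? m (some c)).getD 0) none)
    else
      'G' :: pass2A rs ps m
  | _, _, _ => []

def comparer_mots (mot_secret : String) (mot_propos_ : String) : String :=
  if PySem.Str.len mot_propos_ = PySem.Str.len mot_secret then
    let r := pass1A mot_secret.toList mot_propos_.toList
    String.ofList (pass2A r.1 mot_propos_.toList r.2)
  else String.ofList []  -- the assert raises here; excluded by Pre_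

-- ===== PORT B =====
def comparer_mots_alt (mot_secret : String) (mot_propos_ : String) : String :=
  if PySem.Str.len mot_propos_ = PySem.Str.len mot_secret then
    let s := mot_secret.toList
    let p := mot_propos_.toList
    -- greens positionally; avail[a] = secret count of a minus greens consumed
    let st := (s.zip p).foldl
      (fun (st : List Char × PySem.Dict Char Int) ab =>
        if ab.1 = ab.2 then (st.1 ++ ['V'], st.2)
        else (st.1 ++ ['G'], st.2.insert ab.1 (st.2.getD ab.1 0 + 1)))
      ([], PySem.Dict.empty)
    -- pos[c] = non-green positions of letter c in the guess, left to right
    let pos := (PySem.List.enumerate (st.1.zip p) 0).foldl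
      (fun (d : PySem.Dict Char (List Int)) x =>
        if x.2.1 ≠ 'V' then d.modify x.2.2 [] (· ++ [x.1]) else d)
      PySem.Dict.empty
    -- mark the leftmost avail[c] positions of each letter 'J'
    let res := pos.items.foldl
      (fun (res : List Char) ci =>
        (PySem.List.slice ci.2 none (some (st.2.getD ci.1 0))).foldl
          (fun r i => PySem.List.pySetD r i 'J') res)
      st.1
    String.ofList res
  else String.ofList []  -- the assert raises here; excluded by Pre_

-- ===== PRECONDITION & SPEC =====
-- A (and B) raise AssertionError when the two strings have different lengths; Pre_ excludes exactly those inputs.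
def Pre_comparer_mots (mot_secret : String) (mot_propos_ : String) : Prop :=
  PySem.Str.len mot_propos_ = PySem.Str.len mot_secret
instance (mot_secret : String) (mot_propos_ : String) : Decidable (Pre_comparer_mots mot_secret mot_propos_) := by unfold Pre_comparer_mots; infer_instance

def pvWitness_comparer_mots : String × String := ("arbre", "barre")

def Spec_comparer_mots (mot_secret : String) (mot_propos_ : String) (out : String) : Prop := out = comparer_mots_alt mot_secret mot_propos_
instance (mot_secret : String) (mot_propos_ : String) (out : String) : Decidable (Spec_comparer_mots mot_secret mot_propos_ out) := by unfold Spec_comparer_mots; infer_instance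

-- ===== CLAIM (what is proved, stated in full; the proofs are below) =====
def Claim_equal_comparer_mots : Prop := ∀ (mot_secret : String) (mot_propos_ : String), Dom_comparer_mots mot_secret mot_propos_ → Pre_comparer_mots mot_secret mot_propos_ → Spec_comparer_mots mot_secret mot_propos_ (comparer_mots mot_secret mot_propos_)

-- ===== LEMMAS AND PROOFS =====

-- per-pair first-pass values
def gRes (ab : Char × Char) : Char := if ab.1 = ab.2 then 'V' else 'G'
def gMot (ab : Char × Char) : Option Char := if ab.1 = ab.2 then none else some ab.1
def convA (r : Char) : Option Char := if r = 'V' then some 'V' else none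

-- number of non-green positions with guessed letter c in a (result, guess) prefix
def cntQ (l : List (Char × Char)) (c : Char) : Nat := l.countP (fun x => x.1 != 'V' && x.2 == c)

-- reference second pass: left-to-right with an availability function
def refRun : List Char → List Char → (Char → Nat) → List Char
  | r :: rs, c :: ps, f =>
    if r = 'V' then 'V' :: refRun rs ps f
    else if 0 < f c then 'J' :: refRun rs ps (fun x => if x = c then f c - 1 else f x)
    else 'G' :: refRun rs ps f
  | _, _, _ => []

-- the positions (from offset off) with non-'V' result and guess letter c
def qList : List Char → List Char → Char → Int → List Int
  | r :: rs, c' :: ps, c, off =>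
    (if r ≠ 'V' ∧ c' = c then [off] else []) ++ qList rs ps c (off + 1)
  | _, _, _, _ => []

theorem pass1A_eq (s p : List Char) :
    pass1A s p = ((s.zip p).map (fun ab => convA (gRes ab)), (s.zip p).map gMot) := by
  induction s generalizing p with
  | nil => cases p <;> simp [pass1A]
  | cons a s ih =>
    cases p with
    | nil => simp [pass1A]
    | cons b p =>
      by_cases h : a = b <;> simp [pass1A, ih, h, gRes, gMot, convA]

theorem removal_count (m : List (Option Char)) (c : Char) (hm : some c ∈ m) (x : Char) :
    (m.set ((PySem.List.index? m (some c)).getD 0) none).count (some x)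
      = m.count (some x) - (if x = c then 1 else 0) := by
  induction m with
  | nil => simp at hm
  | cons o l ih =>
    by_cases ho : o = some c
    · subst ho
      rw [PySem.List.index?_cons_self]
      by_cases hx : x = c
      · simp [List.count_cons, hx]
      · have hcx : ¬ c = x := fun h => hx h.symm
        simp [List.count_cons, hx, hcx]
    · have hm' : some c ∈ l := by
        rcases List.mem_cons.mp hm with h | h
        · exact absurd h.symm ho
        · exact h
      have hs : (PySem.List.index? l (some c)).isSome :=
        (PySem.List.index?_isSome_iff l (some c)).mpr hm'
      obtain ⟨k, hk⟩ := Option.isSome_iff_exists.mp hs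
      rw [PySem.List.index?_cons_of_ne l ho, hk]
      simp only [Option.map_some, Option.getD_some, List.set_cons_succ, List.count_cons]
      have := ih hm'
      rw [hk] at this
      simp only [Option.getD_some] at this
      rw [this]
      by_cases hx : x = c
      · subst hx
        have hpos : 0 < l.count (some x) := List.count_pos_iff.mpr hm'
        by_cases hox : o = some x <;> simp [hox] <;> omega
      · simp [hx]

theorem pass2A_eq_refRun (rs ps : List Char) (m : List (Option Char)) :
    pass2A (rs.map convA) ps m = refRun rs ps (fun c => m.count (some c)) := by
  induction rs generalizing ps m with
  | nil => cases ps <;> simp [pass2A, refRun]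
  | cons r rs ih =>
    cases ps with
    | nil => by_cases hr : r = 'V' <;> simp [pass2A, refRun, convA, hr]
    | cons c ps =>
      by_cases hr : r = 'V'
      · simp [pass2A, refRun, convA, hr, ih]
      · have hconv : convA r = none := by simp [convA, hr]
        by_cases hmem : some c ∈ m
        · have hcnt : 0 < m.count (some c) := List.count_pos_iff.mpr hmem
          have hstep : pass2A (List.map convA (r :: rs)) (c :: ps) m
              = 'J' :: pass2A (List.map convA rs) ps
                  (m.set ((PySem.List.index? m (some c)).getD 0) none) := by
            simp [pass2A, hconv, hmem]
          rw [hstep, ih]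
          have hf : (fun x => (m.set ((PySem.List.index? m (some c)).getD 0) none).count (some x))
              = (fun x => (if x = c then m.count (some c) - 1 else m.count (some x))) := by
            funext x; rw [removal_count m c hmem x]; by_cases hx : x = c <;> simp [hx]
          rw [hf]
          simp [refRun, hr, hcnt]
        · have hcnt : ¬ 0 < m.count (some c) := by
            rw [List.count_pos_iff]; exact hmem
          simp [pass2A, hconv, hmem, refRun, hr, hcnt, ih]

theorem length_refRun (rs ps : List Char) (f : Char → Nat) :
    (refRun rs ps f).length = min rs.length ps.length := by
  induction rs generalizing ps f with
  | nil => cases ps <;> simp [refRun]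
  | cons r rs ih =>
    cases ps with
    | nil => simp [refRun]
    | cons c ps =>
      simp only [refRun]
      split_ifs <;> simp [ih] <;> omega

theorem refRun_getElem? (rs ps : List Char) (f : Char → Nat) (i : Nat)
    (h1 : i < rs.length) (h2 : i < ps.length) :
    (refRun rs ps f)[i]? = some (if rs[i] = 'V' then 'V'
      else if cntQ ((rs.take i).zip (ps.take i)) ps[i] < f ps[i] then 'J' else 'G') := by
  induction rs generalizing ps f i with
  | nil => simp at h1
  | cons r rs ih =>
    cases ps with
    | nil => simp at h2
    | cons c ps =>
      cases i with
      | zero =>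
        by_cases hr : r = 'V'
        · simp [refRun, cntQ, hr]
        · by_cases hf0 : 0 < f c <;> simp [refRun, cntQ, hr, hf0]
      | succ i =>
        have h1' : i < rs.length := by simpa using h1
        have h2' : i < ps.length := by simpa using h2
        by_cases hr : r = 'V'
        · rw [show refRun (r :: rs) (c :: ps) f = 'V' :: refRun rs ps f by simp [refRun, hr]]
          rw [List.getElem?_cons_succ, ih ps f i h1' h2']
          simp only [List.take_succ_cons, List.getElem_cons_succ, cntQ, List.zip_cons_cons,
            List.countP_cons, hr]
          rfl
        · by_cases hf0 : 0 < f c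
          · rw [show refRun (r :: rs) (c :: ps) f
                = 'J' :: refRun rs ps (fun x => if x = c then f c - 1 else f x) by
              simp [refRun, hr, hf0]]
            rw [List.getElem?_cons_succ, ih ps _ i h1' h2']
            simp only [List.getElem_cons_succ, List.take_succ_cons, List.zip_cons_cons]
            by_cases hv : rs[i] = 'V'
            · simp [hv]
            · have hcnt : cntQ ((r, c) :: (rs.take i).zip (ps.take i)) ps[i]
                  = cntQ ((rs.take i).zip (ps.take i)) ps[i] + (if ps[i] = c then 1 else 0) := by
                by_cases hpc : ps[i] = c
                · simp [cntQ, List.countP_cons, hr, hpc]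
                · have : ¬ c = ps[i] := fun h => hpc h.symm
                  simp [cntQ, List.countP_cons, hr, hpc, this]
              have hiff : (cntQ ((rs.take i).zip (ps.take i)) ps[i]
                    < (if ps[i] = c then f c - 1 else f ps[i]))
                  ↔ (cntQ ((rs.take i).zip (ps.take i)) ps[i]
                    + (if ps[i] = c then 1 else 0) < f ps[i]) := by
                by_cases hpc : ps[i] = c <;> simp [hpc] <;> omega
              simp only [hcnt, if_neg hv]
              exact congrArg some (if_congr hiff rfl rfl)
          · rw [show refRun (r :: rs) (c :: ps) f = 'G' :: refRun rs ps f by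
              simp [refRun, hr, hf0]]
            rw [List.getElem?_cons_succ, ih ps f i h1' h2']
            simp only [List.getElem_cons_succ, List.take_succ_cons, List.zip_cons_cons]
            by_cases hv : rs[i] = 'V'
            · simp [hv]
            · have hcnt : cntQ ((r, c) :: (rs.take i).zip (ps.take i)) ps[i]
                  = cntQ ((rs.take i).zip (ps.take i)) ps[i] + (if ps[i] = c then 1 else 0) := by
                by_cases hpc : ps[i] = c
                · simp [cntQ, List.countP_cons, hr, hpc]
                · have : ¬ c = ps[i] := fun h => hpc h.symm
                  simp [cntQ, List.countP_cons, hr, hpc, this]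
              have hiff : (cntQ ((rs.take i).zip (ps.take i)) ps[i] < f ps[i])
                  ↔ (cntQ ((rs.take i).zip (ps.take i)) ps[i]
                    + (if ps[i] = c then 1 else 0) < f ps[i]) := by
                by_cases hpc : ps[i] = c <;> simp [hpc] <;> omega
              simp only [hcnt, if_neg hv]
              exact congrArg some (if_congr hiff rfl rfl)

-- B first pass decomposes componentwise
theorem pass1B_eq (l : List (Char × Char)) (r0 : List Char) (d0 : PySem.Dict Char Int) :
    l.foldl
      (fun (st : List Char × PySem.Dict Char Int) ab =>
        if ab.1 = ab.2 then (st.1 ++ ['V'], st.2)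
        else (st.1 ++ ['G'], st.2.insert ab.1 (st.2.getD ab.1 0 + 1)))
      (r0, d0)
    = (r0 ++ l.map gRes,
       l.foldl (fun d ab => if ab.1 = ab.2 then d else d.insert ab.1 (d.getD ab.1 0 + 1)) d0) := by
  induction l generalizing r0 d0 with
  | nil => simp
  | cons ab l ih =>
    by_cases h : ab.1 = ab.2 <;> simp [List.foldl_cons, h, ih, gRes]

theorem availD_getD (l : List (Char × Char)) (d0 : PySem.Dict Char Int) (c : Char) :
    (l.foldl (fun d ab => if ab.1 = ab.2 then d else d.insert ab.1 (d.getD ab.1 0 + 1)) d0).getD c 0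
      = d0.getD c 0 + (((l.filter (fun ab => ab.1 != ab.2)).map (·.1)).count c : Int) := by
  induction l generalizing d0 with
  | nil => simp
  | cons ab l ih =>
    by_cases h : ab.1 = ab.2
    · simp [List.foldl_cons, h, ih]
    · rw [List.foldl_cons, if_neg h, ih]
      rw [PySem.Dict.getD_insert]
      by_cases hc : c = ab.1
      · simp [List.filter_cons, h, List.count_cons, hc]; push_cast; omega
      · have hac : ¬ ab.1 = c := fun hh => hc hh.symm
        simp [List.filter_cons, h, List.count_cons, hc, hac]

theorem pos_getD (rs ps : List Char) (off : Int) (d : PySem.Dict Char (List Int)) (c : Char) :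
    ((PySem.List.enumerate (rs.zip ps) off).foldl
      (fun (d : PySem.Dict Char (List Int)) x =>
        if x.2.1 ≠ 'V' then d.modify x.2.2 [] (· ++ [x.1]) else d) d).getD c []
      = d.getD c [] ++ qList rs ps c off := by
  induction rs generalizing ps off d with
  | nil => cases ps <;> simp [qList, PySem.List.enumerate]
  | cons r rs ih =>
    cases ps with
    | nil => simp [qList, PySem.List.enumerate]
    | cons c' ps =>
      rw [List.zip_cons_cons, PySem.List.enumerate_cons, List.foldl_cons]
      by_cases hr : r = 'V'
      · have hif : (if ((off, (r, c')) : Int × Char × Char).2.1 ≠ 'V'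
              then d.modify (off, (r, c')).2.2 [] (· ++ [(off, (r, c')).1]) else d) = d := by
          simp [hr]
        rw [hif, ih]
        simp [qList, hr]
      · have hif : (if ((off, (r, c')) : Int × Char × Char).2.1 ≠ 'V'
              then d.modify (off, (r, c')).2.2 [] (· ++ [(off, (r, c')).1]) else d)
            = d.modify c' [] (· ++ [off]) := by
          simp [hr]
        rw [hif, ih, PySem.Dict.getD_modify]
        by_cases hc : c = c'
        · subst hc
          simp [qList, hr]
        · have : ¬ c' = c := fun h => hc h.symm
          simp [qList, hr, hc, this]

theorem posFold_eq_filter (l : List (Int × Char × Char)) (d : PySem.Dict Char (List Int)) :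
    l.foldl (fun d x => if x.2.1 ≠ 'V' then d.modify x.2.2 [] (· ++ [x.1]) else d) d
      = (l.filter (fun x => decide (x.2.1 ≠ 'V'))).foldl
          (fun d x => d.modify x.2.2 [] (· ++ [x.1])) d := by
  induction l generalizing d with
  | nil => rfl
  | cons x l ih =>
    by_cases h : x.2.1 ≠ 'V'
    · rw [List.foldl_cons, if_pos h, List.filter_cons, if_pos (by simpa using h),
        List.foldl_cons, ih]
    · rw [List.foldl_cons, if_neg h, List.filter_cons, if_neg (by simpa using h), ih]

theorem pos_keys_nodup (rs ps : List Char) (off : Int) :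
    (((PySem.List.enumerate (rs.zip ps) off).foldl
      (fun (d : PySem.Dict Char (List Int)) x =>
        if x.2.1 ≠ 'V' then d.modify x.2.2 [] (· ++ [x.1]) else d) PySem.Dict.empty)).keys.Nodup := by
  rw [posFold_eq_filter (PySem.List.enumerate (rs.zip ps) off) PySem.Dict.empty]
  exact PySem.Dict.nodup_keys_foldl_modify_key (κ := Char) (ν := List Int)
    (β := Int × Char × Char) _ (fun x => x.2.2) [] (fun _ x v => v ++ [x.1]) _
    PySem.Dict.nodup_keys_empty

theorem qList_lb (rs ps : List Char) (c : Char) (off : Int) :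
    ∀ j ∈ qList rs ps c off, off ≤ j := by
  induction rs generalizing ps off with
  | nil => cases ps <;> simp [qList]
  | cons r rs ih =>
    cases ps with
    | nil => simp [qList]
    | cons c' ps =>
      intro j hj
      simp only [qList, List.mem_append] at hj
      rcases hj with hj | hj
      · split_ifs at hj <;> simp at hj; omega
      · have := ih ps (off + 1) j hj; omega

theorem mem_take_qList (rs : List Char) (ps : List Char) (c : Char) (off : Int) (k : Nat) (t : Nat) :
    ((off + (t : Int)) ∈ (qList rs ps c off).take k)
      ↔ ∃ (h1 : t < rs.length) (h2 : t < ps.length),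
          rs[t] ≠ 'V' ∧ ps[t] = c ∧ cntQ ((rs.take t).zip (ps.take t)) c < k := by
  induction rs generalizing ps off k t with
  | nil => cases ps <;> simp [qList]
  | cons r rs ih =>
    cases ps with
    | nil => simp [qList]
    | cons c' ps =>
      by_cases hcond : r ≠ 'V' ∧ c' = c
      · rw [show qList (r :: rs) (c' :: ps) c off = off :: qList rs ps c (off + 1) by
          simp [qList, hcond]]
        cases k with
        | zero =>
          simp only [List.take_zero, List.not_mem_nil, false_iff]
          rintro ⟨h1, h2, hv, hc, hcnt⟩
          exact absurd hcnt (Nat.not_lt_zero _)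
        | succ k =>
          rw [List.take_succ_cons]
          cases t with
          | zero =>
            simp only [Nat.cast_zero, add_zero, List.mem_cons]
            constructor
            · intro _
              exact ⟨by simp, by simp, by simpa using hcond.1, by simpa using hcond.2,
                by simp [cntQ]⟩
            · intro _; simp
          | succ u =>
            have hsh : off + ((u + 1 : Nat) : Int) = (off + 1) + (u : Nat) := by push_cast; ring
            rw [List.mem_cons, hsh]
            have hcc : cntQ (((r :: rs).take (u + 1)).zip ((c' :: ps).take (u + 1))) c
                = cntQ ((rs.take u).zip (ps.take u)) c + 1 := by
              obtain ⟨hv', hc'⟩ := hcond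
              subst hc'
              simp [List.take_succ_cons, cntQ, List.countP_cons, hv']
            constructor
            · rintro (h | h)
              · exfalso; omega
              · obtain ⟨h1, h2, hv, hc, hcnt⟩ := (ih ps (off + 1) k u).mp h
                exact ⟨by simpa using h1, by simpa using h2, by simpa using hv,
                  by simpa using hc, by rw [hcc]; omega⟩
            · rintro ⟨h1, h2, hv, hc, hcnt⟩
              right
              refine (ih ps (off + 1) k u).mpr ⟨by simpa using h1, by simpa using h2,
                by simpa using hv, by simpa using hc, ?_⟩
              rw [hcc] at hcnt; omega
      · rw [show qList (r :: rs) (c' :: ps) c off = qList rs ps c (off + 1) by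
          simp [qList, hcond]]
        have hpf : (((r, c') : Char × Char).1 != 'V' && ((r, c') : Char × Char).2 == c) = false := by
          rcases not_and_or.mp hcond with h | h
          · simp only [not_not] at h; simp [h]
          · simp [h]
        cases t with
        | zero =>
          constructor
          · intro hmem
            have hle := qList_lb rs ps c (off + 1) _ (List.mem_of_mem_take hmem)
            simp only [Nat.cast_zero, add_zero] at hle ⊢
            omega
          · rintro ⟨h1, h2, hv, hc, _⟩
            exact absurd ⟨by simpa using hv, by simpa using hc⟩ hcond
        | succ u =>
          have hsh : off + ((u + 1 : Nat) : Int) = (off + 1) + (u : Nat) := by push_cast; ring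
          rw [hsh, ih ps (off + 1) k u]
          have hcc : cntQ (((r :: rs).take (u + 1)).zip ((c' :: ps).take (u + 1))) c
              = cntQ ((rs.take u).zip (ps.take u)) c := by
            simp only [List.take_succ_cons, List.zip_cons_cons, cntQ, List.countP_cons, hpf]
            simp
          constructor
          · rintro ⟨h1, h2, hv, hc, hcnt⟩
            exact ⟨by simpa using h1, by simpa using h2, by simpa using hv,
              by simpa using hc, by rw [hcc]; exact hcnt⟩
          · rintro ⟨h1, h2, hv, hc, hcnt⟩
            exact ⟨by simpa using h1, by simpa using h2, by simpa using hv,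
              by simpa using hc, by rw [hcc] at hcnt; exact hcnt⟩

theorem setJ_getElem? (l : List Int) (res : List Char) (i : Nat) (hl : ∀ j ∈ l, 0 ≤ j)
    (hi : i < res.length) :
    (l.foldl (fun r j => PySem.List.pySetD r j 'J') res)[i]?
      = if (i : Int) ∈ l then some 'J' else res[i]? := by
  induction l generalizing res with
  | nil => simp
  | cons j l ih =>
    have hj : 0 ≤ j := hl j List.mem_cons_self
    rw [List.foldl_cons, PySem.List.pySetD_of_nonneg res 'J' hj,
      ih (res.set j.toNat 'J') (fun x hx => hl x (List.mem_cons_of_mem _ hx))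
        (by rw [List.length_set]; exact hi)]
    rw [List.getElem?_set]
    by_cases h1 : (i : Int) ∈ l
    · simp [h1]
    · by_cases h3 : (i : Int) = j
      · have he : j.toNat = i := by omega
        simp [h1, h3, he, show j.toNat < res.length by omega]
        exact fun _ => hi
      · have he : ¬ j.toNat = i := by omega
        simp [h1, h3, he]

theorem setJ_length (l : List Int) (res : List Char) :
    (l.foldl (fun r j => PySem.List.pySetD r j 'J') res).length = res.length := by
  induction l generalizing res with
  | nil => rfl
  | cons j l ih => simp [List.foldl_cons, ih, PySem.List.length_pySetD]

theorem itemsFold_getElem? (av : PySem.Dict Char Int) (items : List (Char × List Int))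
    (res : List Char) (i : Nat) (h0 : ∀ ci ∈ items, ∀ j ∈ ci.2, 0 ≤ j)
    (hK : ∀ c, 0 ≤ av.getD c 0) (hi : i < res.length) :
    (items.foldl (fun res ci =>
        (PySem.List.slice ci.2 none (some (av.getD ci.1 0))).foldl
          (fun r j => PySem.List.pySetD r j 'J') res) res)[i]?
      = if (∃ ci ∈ items, (i : Int) ∈ ci.2.take (av.getD ci.1 0).toNat)
        then some 'J' else res[i]? := by
  induction items generalizing res with
  | nil => simp
  | cons ci items ih =>
    rw [List.foldl_cons]
    have hsl : PySem.List.slice ci.2 none (some (av.getD ci.1 0))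
        = ci.2.take (av.getD ci.1 0).toNat := by
      have h0' := hK ci.1
      conv_lhs => rw [show av.getD ci.1 0 = (((av.getD ci.1 0).toNat : Nat) : Int)
        from (Int.toNat_of_nonneg h0').symm]
      rw [PySem.List.slice_to_natCast]
    rw [hsl]
    rw [ih ((ci.2.take (av.getD ci.1 0).toNat).foldl (fun r j => PySem.List.pySetD r j 'J') res)
      (fun x hx => h0 x (List.mem_cons_of_mem _ hx)) (by rw [setJ_length]; exact hi)]
    rw [setJ_getElem? _ res i
      (fun j hj => h0 ci List.mem_cons_self j (List.mem_of_mem_take hj)) hi]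
    by_cases ha : ∃ x ∈ items, (i : Int) ∈ x.2.take (av.getD x.1 0).toNat
    · simp [ha, List.exists_mem_cons_iff]
    · by_cases hb : (i : Int) ∈ ci.2.take (av.getD ci.1 0).toNat <;>
        simp [ha, hb, List.exists_mem_cons_iff]

theorem itemsFold_length (av : PySem.Dict Char Int) (items : List (Char × List Int))
    (res : List Char) :
    (items.foldl (fun res ci =>
        (PySem.List.slice ci.2 none (some (av.getD ci.1 0))).foldl
          (fun r j => PySem.List.pySetD r j 'J') res) res).length = res.length := by
  induction items generalizing res with
  | nil => rfl
  | cons ci items ih => simp [List.foldl_cons, ih, setJ_length]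

-- proof-side names for B's intermediate data
def res0L (s p : List Char) : List Char := (s.zip p).map gRes
def availD (s p : List Char) : PySem.Dict Char Int :=
  (s.zip p).foldl
    (fun d ab => if ab.1 = ab.2 then d else d.insert ab.1 (d.getD ab.1 0 + 1)) PySem.Dict.empty
def posD (s p : List Char) : PySem.Dict Char (List Int) :=
  (PySem.List.enumerate ((res0L s p).zip p) 0).foldl
    (fun d x => if x.2.1 ≠ 'V' then d.modify x.2.2 [] (· ++ [x.1]) else d) PySem.Dict.empty
def fAv (s p : List Char) (c : Char) : Nat := ((s.zip p).map gMot).count (some c)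

theorem countEq (l : List (Char × Char)) (c : Char) :
    (l.map gMot).count (some c)
      = ((l.filter (fun ab => ab.1 != ab.2)).map (·.1)).count c := by
  induction l with
  | nil => rfl
  | cons ab l ih =>
    by_cases h : ab.1 = ab.2
    · simp [gMot, h, List.count_cons, List.filter_cons, ih]
    · by_cases hc : ab.1 = c
      · have h2 : ¬ c = ab.2 := by rw [← hc]; exact h
        simp [gMot, h, hc, h2, List.count_cons, List.filter_cons, ih]
      · simp [gMot, h, hc, List.count_cons, List.filter_cons, ih]

theorem main_list (s p : List Char) (hlen : p.length = s.length) :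
    pass2A (pass1A s p).1 p (pass1A s p).2
      = (posD s p).items.foldl
          (fun res ci =>
            (PySem.List.slice ci.2 none (some ((availD s p).getD ci.1 0))).foldl
              (fun r j => PySem.List.pySetD r j 'J') res) (res0L s p) := by
  have hA : pass2A (pass1A s p).1 p (pass1A s p).2
      = refRun (res0L s p) p (fun c => fAv s p c) := by
    rw [pass1A_eq]
    have hmm : (s.zip p).map (fun ab => convA (gRes ab)) = (res0L s p).map convA := by
      simp [res0L, List.map_map, Function.comp]
    rw [hmm, pass2A_eq_refRun]
    rfl
  rw [hA]
  have hll : (res0L s p).length = p.length := by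
    simp [res0L, hlen]
  have hnodup : (posD s p).keys.Nodup := pos_keys_nodup (res0L s p) p 0
  have hgdq : ∀ c, (posD s p).getD c [] = qList (res0L s p) p c 0 := by
    intro c
    have h := pos_getD (res0L s p) p 0 PySem.Dict.empty c
    simpa [posD, PySem.Dict.getD_empty] using h
  have hitems : ∀ ci ∈ (posD s p).items, ci.2 = qList (res0L s p) p ci.1 0 := by
    rintro ⟨c0, l0⟩ hci
    have h := PySem.Dict.getD_of_mem_items (posD s p) hci hnodup []
    rw [hgdq c0] at h
    exact h.symm
  have hKnn : ∀ c, 0 ≤ (availD s p).getD c 0 := by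
    intro c
    have h := availD_getD (s.zip p) PySem.Dict.empty c
    rw [PySem.Dict.getD_empty, zero_add] at h
    rw [show (availD s p).getD c 0 = _ from h]
    exact Int.natCast_nonneg _
  have hKf : ∀ c, ((availD s p).getD c 0).toNat = fAv s p c := by
    intro c
    have h := availD_getD (s.zip p) PySem.Dict.empty c
    rw [PySem.Dict.getD_empty, zero_add] at h
    rw [show (availD s p).getD c 0 = _ from h, Int.toNat_natCast]
    exact (countEq (s.zip p) c).symm
  have h0 : ∀ ci ∈ (posD s p).items, ∀ j ∈ ci.2, 0 ≤ j := by
    intro ci hci j hj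
    rw [hitems ci hci] at hj
    exact qList_lb _ _ _ _ j hj
  apply List.ext_getElem?
  intro i
  by_cases hi : i < (res0L s p).length
  · have hip : i < p.length := by omega
    rw [refRun_getElem? (res0L s p) p _ i hi hip]
    rw [itemsFold_getElem? (availD s p) (posD s p).items (res0L s p) i h0 hKnn hi]
    have hro : (res0L s p)[i]? = some ((res0L s p)[i]) := List.getElem?_eq_getElem hi
    have hVG : (res0L s p)[i] = 'V' ∨ (res0L s p)[i] = 'G' := by
      have hge : (res0L s p)[i] = gRes ((s.zip p)[i]'(by simpa [res0L] using hi)) := by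
        simp [res0L]
      rw [hge]
      unfold gRes
      split_ifs <;> simp
    have hex : (∃ ci ∈ (posD s p).items,
          (i : Int) ∈ ci.2.take (((availD s p).getD ci.1 0).toNat))
        ↔ ((res0L s p)[i] ≠ 'V' ∧
            cntQ (((res0L s p).take i).zip (p.take i)) (p[i]) < fAv s p (p[i])) := by
      constructor
      · rintro ⟨⟨c0, l0⟩, hmem, hin⟩
        have hl0 : l0 = qList (res0L s p) p c0 0 := hitems (c0, l0) hmem
        rw [hl0, hKf c0] at hin
        have hin' : (0 : Int) + (i : Nat) ∈ (qList (res0L s p) p c0 0).take (fAv s p c0) := by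
          simpa using hin
        obtain ⟨h1, h2, hv, hc, hcnt⟩ := (mem_take_qList _ _ _ _ _ _).mp hin'
        have hc' : p[i] = c0 := hc
        refine ⟨hv, ?_⟩
        rw [hc']
        exact hcnt
      · rintro ⟨hv, hcnt⟩
        have hmm := (mem_take_qList (res0L s p) p (p[i]) 0 (fAv s p (p[i])) i).mpr
          ⟨hi, hip, hv, rfl, hcnt⟩
        have hmm' : ((i : Nat) : Int) ∈ (qList (res0L s p) p (p[i]) 0).take (fAv s p (p[i])) := by
          simpa using hmm
        have hne : qList (res0L s p) p (p[i]) 0 ≠ [] := by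
          intro h
          rw [h] at hmm'
          simp at hmm'
        cases hget : (posD s p).get? (p[i]) with
        | none =>
          exact absurd ((hgdq (p[i])).symm.trans
            (PySem.Dict.getD_of_get?_eq_none _ [] hget)) hne
        | some l0 =>
          have hmemit := PySem.Dict.mem_items_of_get?_eq_some (posD s p) hget
          refine ⟨(p[i], l0), hmemit, ?_⟩
          have hl0 : l0 = qList (res0L s p) p (p[i]) 0 := hitems _ hmemit
          rw [hl0, hKf]
          exact hmm'
    rcases hVG with hV | hG
    · have hnex : ¬ (∃ ci ∈ (posD s p).items,
          (i : Int) ∈ ci.2.take (((availD s p).getD ci.1 0).toNat)) := by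
        rw [hex]
        rintro ⟨h, _⟩
        exact h hV
      rw [if_neg hnex, hro, hV]
      simp [hV]
    · by_cases hlt : cntQ (((res0L s p).take i).zip (p.take i)) (p[i]) < fAv s p (p[i])
      · have hyes : (∃ ci ∈ (posD s p).items,
            (i : Int) ∈ ci.2.take (((availD s p).getD ci.1 0).toNat)) :=
          hex.mpr ⟨by simp [hG], hlt⟩
        rw [if_pos hyes]
        simp [hG, hlt]
      · have hnex : ¬ (∃ ci ∈ (posD s p).items,
            (i : Int) ∈ ci.2.take (((availD s p).getD ci.1 0).toNat)) := by
          rw [hex]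
          rintro ⟨_, h⟩
          exact hlt h
        rw [if_neg hnex, hro]
        simp [hG, hlt]
  · rw [List.getElem?_eq_none (by rw [length_refRun]; omega),
      List.getElem?_eq_none (le_of_not_gt (by rw [itemsFold_length]; exact hi))]

-- ===== VERDICT (by name: the statement is the Claim_ definition above) =====
theorem comparer_mots_spec : Claim_equal_comparer_mots := by
  intro ms mp _ hpre
  show comparer_mots ms mp = comparer_mots_alt ms mp
  have hlen : mp.toList.length = ms.toList.length := by
    have h := hpre
    unfold Pre_comparer_mots at h
    rw [PySem.Str.len_eq, PySem.Str.len_eq] at h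
    exact_mod_cast h
  have hpre' : PySem.Str.len mp = PySem.Str.len ms := hpre
  unfold comparer_mots comparer_mots_alt
  rw [if_pos hpre', if_pos hpre']
  simp only [pass1B_eq, List.nil_append]
  exact congrArg String.ofList (main_list ms.toList mp.toList hlen)
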